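-- pv_equiv track=rewrite | github.com/rendlaaditya/Hackerrank-codes | Problem Solving/Algorithms/Greedy/Jim and the Orders/code.py | jimOrders
-- ===== SOURCE A (Python) =====
-- def jimOrders(orders):
--     d=dict()
--     n=len(orders)
--     for i in range(n):
--         try:
--             d[orders[i][0]+orders[i][1]]=d[orders[i][0]+orders[i][1]]+[i]
--         except:
--             d[orders[i][0]+orders[i][1]]=[i]
--     a=list(d.keys())
--     a.sort()
--     b=[0]*n
--     k=0
--     for i in a:
--         for j in d[i]:
--             b[k]=j+1
--             k=k+1
--     return b
-- ===== SOURCE B (Python) =====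
-- def jimOrders(orders):
--     idx = sorted(range(len(orders)), key=lambda i: orders[i][0] + orders[i][1])
--     return [i + 1 for i in idx]
-- ===== Notes on version B (the rewrite author's own statement) =====
-- stated objective: simpler
-- what changed: Replaced A's dict-bucketing (group indices by sum, sort the keys, then fill a preallocated array via two nested loops with a running cursor) by one stable sort of the index range keyed by the sum, followed by a +1 map; no grouping table, no cursor arithmetic.
import Mathlib
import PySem

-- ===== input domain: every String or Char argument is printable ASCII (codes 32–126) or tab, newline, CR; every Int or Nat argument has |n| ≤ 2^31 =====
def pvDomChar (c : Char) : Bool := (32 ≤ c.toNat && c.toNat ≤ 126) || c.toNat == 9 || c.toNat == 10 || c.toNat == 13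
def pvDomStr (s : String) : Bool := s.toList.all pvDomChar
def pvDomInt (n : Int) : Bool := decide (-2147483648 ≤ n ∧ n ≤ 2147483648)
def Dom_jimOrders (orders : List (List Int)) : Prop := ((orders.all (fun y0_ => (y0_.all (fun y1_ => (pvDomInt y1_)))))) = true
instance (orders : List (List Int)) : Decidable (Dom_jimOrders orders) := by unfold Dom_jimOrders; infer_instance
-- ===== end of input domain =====

-- B replaces A's dict-bucketing + cursor fill by one stable sort of the index range keyed by the row sum (objective: simpler).

-- shared helper: orders[i][0] + orders[i][1] (exact under Pre_, where both indexings are in range)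
def rowKey (orders : List (List Int)) (i : Int) : Int :=
  PySem.List.pyGetD (PySem.List.pyGetD orders i []) 0 0 +
  PySem.List.pyGetD (PySem.List.pyGetD orders i []) 1 0

-- ===== PORT A =====
def jimOrders (orders : List (List Int)) : List Int :=
  let n : Int := orders.length
  let d : PySem.Dict Int (List Int) :=
    (PySem.List.pyRange 0 n 1).foldl (fun d i =>
      match d.get? (rowKey orders i) with
      | some v => d.insert (rowKey orders i) (v ++ [i])
      | none   => d.insert (rowKey orders i) [i]) PySem.Dict.empty
  let a := PySem.List.sorted d.keys (fun x => x) false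
  let b : List Int := PySem.List.pyRepeat [0] n
  let bk := a.foldl (fun (bk : List Int × Int) i =>
      (d.getD i []).foldl (fun (bk : List Int × Int) j =>
        (PySem.List.pySetD bk.1 bk.2 (j + 1), bk.2 + 1)) bk) (b, 0)
  bk.1

-- ===== PORT B =====
def jimOrders_alt (orders : List (List Int)) : List Int :=
  let idx := PySem.List.sorted (PySem.List.pyRange 0 (orders.length : Int) 1)
               (fun i => rowKey orders i) false
  idx.map (fun i => i + 1)

-- ===== PRECONDITION & SPEC =====
-- Pre_ excludes inputs containing a row with fewer than two entries: there Python A raises IndexError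
def Pre_jimOrders (orders : List (List Int)) : Prop := ∀ r ∈ orders, 2 ≤ r.length
instance (orders : List (List Int)) : Decidable (Pre_jimOrders orders) := by
  unfold Pre_jimOrders; infer_instance

def pvWitness_jimOrders : List (List Int) := [[3, 4], [1, 1], [2, 2]]

def Spec_jimOrders (orders : List (List Int)) (out : List Int) : Prop := out = jimOrders_alt orders
instance (orders : List (List Int)) (out : List Int) : Decidable (Spec_jimOrders orders out) := by
  unfold Spec_jimOrders; infer_instance

-- ===== CLAIM (what is proved, stated in full; the proofs are below) =====
def Claim_equal_jimOrders : Prop :=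
  ∀ (orders : List (List Int)), Dom_jimOrders orders → Pre_jimOrders orders →
    Spec_jimOrders orders (jimOrders orders)

-- ===== LEMMAS AND PROOFS =====

-- the stable order both programs realise: increasing key, ties by original index
def pvRel (f : Int → Int) (a b : Int) : Prop := f a < f b ∨ (f a = f b ∧ a ≤ b)

theorem pvRel_antisymm (f : Int → Int) (a b : Int) (h1 : pvRel f a b) (h2 : pvRel f b a) : a = b := by
  rcases h1 with h1 | ⟨e1, l1⟩ <;> rcases h2 with h2 | ⟨e2, l2⟩ <;> omega

-- stable insertion keeps pvRel-pairwise when the new element is numerically above everything present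
theorem pvInsertBy_pairwise (f : Int → Int) (x : Int) :
    ∀ (acc : List Int), acc.Pairwise (pvRel f) → (∀ y ∈ acc, y < x) →
    (PySem.List.insertBy (fun a b => decide (f a < f b)) x acc).Pairwise (pvRel f) := by
  intro acc
  induction acc with
  | nil => intro _ _; simp [PySem.List.insertBy]
  | cons y ys ih =>
    intro hp hlt
    rw [List.pairwise_cons] at hp
    simp only [PySem.List.insertBy]
    by_cases hb : f x < f y
    · simp only [hb, decide_true, if_true]
      refine List.pairwise_cons.2 ⟨?_, List.pairwise_cons.2 ⟨hp.1, hp.2⟩⟩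
      intro z hz
      rcases List.mem_cons.1 hz with rfl | hz'
      · exact Or.inl hb
      · have := hp.1 z hz'
        left
        rcases this with h | ⟨e, _⟩ <;> omega
    · simp only [hb, decide_false, Bool.false_eq_true, if_false]
      refine List.pairwise_cons.2 ⟨?_, ih hp.2 (fun z hz => hlt z (List.mem_cons_of_mem y hz))⟩
      intro z hz
      rcases (PySem.List.mem_insertBy _ _ _ _).1 hz with rfl | hz'
      · rcases lt_or_eq_of_le (not_lt.1 hb) with h | h
        · exact Or.inl h
        · exact Or.inr ⟨h.symm ▸ rfl, le_of_lt (hlt y (List.mem_cons_self))⟩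
      · exact hp.1 z hz'

theorem pvFoldl_insertBy_pairwise (f : Int → Int) :
    ∀ (xs acc : List Int), xs.Pairwise (· < ·) → acc.Pairwise (pvRel f) →
    (∀ y ∈ acc, ∀ x ∈ xs, y < x) →
    (xs.foldl (fun acc x => PySem.List.insertBy (fun a b => decide (f a < f b)) x acc) acc).Pairwise (pvRel f) := by
  intro xs
  induction xs with
  | nil => intro acc _ hp _; simpa using hp
  | cons x xs ih =>
    intro acc hxs hp hcross
    rw [List.pairwise_cons] at hxs
    simp only [List.foldl_cons]
    apply ih _ hxs.2
    · exact pvInsertBy_pairwise f x acc hp (fun y hy => hcross y hy x List.mem_cons_self)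
    · intro y hy z hz
      rcases (PySem.List.mem_insertBy _ _ _ _).1 hy with rfl | hy'
      · exact hxs.1 z hz
      · exact hcross y hy' z (List.mem_cons_of_mem x hz)

-- B's sort is pvRel-pairwise (stability: ties stay in range order)
theorem pvSorted_range_pairwise (f : Int → Int) (n : Int) :
    (PySem.List.sorted (PySem.List.pyRange 0 n 1) f false).Pairwise (pvRel f) := by
  rw [PySem.List.sorted_eq_foldl_insertBy]
  exact pvFoldl_insertBy_pairwise f _ [] (PySem.List.pairwise_lt_pyRange_one 0 n) (by simp) (by simp)

-- A's dict loop step is Dict.modify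
theorem pvStep_eq_modify (orders : List (List Int)) (d : PySem.Dict Int (List Int)) (i : Int) :
    (match d.get? (rowKey orders i) with
      | some v => d.insert (rowKey orders i) (v ++ [i])
      | none   => d.insert (rowKey orders i) [i]) =
    d.modify (rowKey orders i) [] (fun v => v ++ [i]) := by
  unfold PySem.Dict.modify
  rw [PySem.Dict.getD_eq_get?_getD]
  cases h : d.get? (rowKey orders i) <;> simp

-- the cursor-fill loop, flattened input: writes L.map (+1) from position k on
theorem pvFill :
    ∀ (L b0 : List Int) (k : Nat), b0.length = k + L.length →
    (L.foldl (fun (bk : List Int × Int) j =>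
        (PySem.List.pySetD bk.1 bk.2 (j + 1), bk.2 + 1)) (b0, (k : Int))) =
    (b0.take k ++ L.map (fun j => j + 1), (k : Int) + L.length) := by
  intro L
  induction L with
  | nil =>
    intro b0 k h
    simp only [List.length_nil, Nat.add_zero] at h
    simp [List.take_of_length_le (le_of_eq h)]
  | cons j L ih =>
    intro b0 k h
    simp only [List.foldl_cons]
    have hk : k < b0.length := by simp at h; omega
    have hset : PySem.List.pySetD b0 (k : Int) (j + 1) = b0.set k (j + 1) :=
      PySem.List.pySetD_natCast b0 k (j + 1)
    have hcast : ((k : Int) + 1) = ((k + 1 : Nat) : Int) := by push_cast; ring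
    rw [hset, hcast, ih (b0.set k (j + 1)) (k + 1) (by simp at h ⊢; omega)]
    have hlen : (b0.take k).length = k := by simp [Nat.min_eq_left hk.le]
    have htake : (b0.set k (j + 1)).take (k + 1) = b0.take k ++ [j + 1] := by
      rw [List.set_eq_take_cons_drop _ hk]
      rw [show k + 1 = (b0.take k).length + 1 by rw [hlen]]
      rw [List.take_append]
      simp
    rw [htake]
    simp only [Prod.mk.injEq]
    refine ⟨by simp, by push_cast; simp; ring⟩

-- sum of "hit the key" indicators over a list of candidate keys
theorem pvSumIte (v : Int) (c : Nat) :
    ∀ (a : List Int), (a.map (fun k => if v == k then c else 0)).sum = a.count v * c := by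
  intro a
  induction a with
  | nil => simp
  | cons k a ih =>
    simp only [List.map_cons, List.sum_cons, ih, List.count_cons]
    by_cases h : v = k
    · subst h
      simp only [beq_self_eq_true, if_true, Nat.add_mul, Nat.one_mul]
      ring
    · have h1 : (v == k) = false := by simp [h]
      have h2 : (k == v) = false := by simp; exact fun e => h (Eq.symm e)
      simp [h1, h2]

-- buckets over the distinct keys, concatenated, are a permutation of the whole range
theorem pvFlat_perm (f : Int → Int) (R a : List Int) (hnd : a.Nodup)
    (hmem : ∀ k, k ∈ a ↔ k ∈ R.map f) :
    (a.flatMap (fun k => R.filter (fun i => f i == k))).Perm R := by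
  rw [List.perm_iff_count]
  intro x
  rw [List.count_flatMap]
  have hterm : ∀ k ∈ a, (List.count x ∘ fun k => R.filter (fun i => f i == k)) k
      = if (f x) == k then R.count x else 0 := by
    intro k _
    by_cases h : f x = k
    · simp only [Function.comp]
      rw [List.count_filter (by simp [h])]
      simp [h]
    · have hk : ((f x) == k) = false := by simp [h]
      simp only [Function.comp, hk, Bool.false_eq_true, if_false]
      rw [List.count_eq_zero]
      intro hmem'
      rcases List.mem_filter.1 hmem' with ⟨_, hpx⟩
      exact h (by simpa using hpx)
  rw [List.map_congr_left hterm, pvSumIte]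
  by_cases hx : x ∈ R
  · have hfx : f x ∈ a := (hmem (f x)).2 (List.mem_map_of_mem hx)
    rw [hnd.count, if_pos hfx, Nat.one_mul]
  · have h0 : R.count x = 0 := List.count_eq_zero.2 hx
    rw [h0, Nat.mul_zero]

-- ===== VERDICT (by name: the statement is the Claim_ definition above) =====
theorem jimOrders_spec : Claim_equal_jimOrders := by
  intro orders _ _
  unfold Spec_jimOrders jimOrders jimOrders_alt
  simp only []
  set f := rowKey orders with hf
  set n : Int := (orders.length : Int) with hn
  set R := PySem.List.pyRange 0 n 1 with hR
  have hstep : (fun (d : PySem.Dict Int (List Int)) i =>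
      match d.get? (f i) with
      | some v => d.insert (f i) (v ++ [i])
      | none   => d.insert (f i) [i]) = fun d i => d.modify (f i) [] (fun v => v ++ [i]) :=
    funext fun d => funext fun i => pvStep_eq_modify orders d i
  rw [hstep]
  set d := R.foldl (fun d i => d.modify (f i) [] (fun v => v ++ [i])) PySem.Dict.empty with hd
  have hkeys : d.keys = PySem.Set.ofList (R.map f) := by
    rw [hd, PySem.Dict.keys_foldl_modify_key R f [] (fun _ i v => v ++ [i]) PySem.Dict.empty,
      PySem.Dict.keys_empty]
    exact PySem.Set.update_empty _
  have hgetD : ∀ k, d.getD k [] = R.filter (fun i => f i == k) := by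
    intro k
    rw [hd, ← List.foldl_map (f := fun i => ((f i : Int), i))
        (g := fun (d : PySem.Dict Int (List Int)) (p : Int × Int) => d.modify p.1 [] (fun v => v ++ [p.2])),
      PySem.Dict.getD_foldl_modify_append]
    simp [List.filter_map, Function.comp_def]
  set a := PySem.List.sorted d.keys (fun x => x) false with ha
  have ha_lt : a.Pairwise (· < ·) := by rw [ha, hkeys]; exact PySem.List.sorted_ofList_pairwise_lt _
  have ha_nd : a.Nodup := ha_lt.imp ne_of_lt
  have ha_mem : ∀ k, k ∈ a ↔ k ∈ R.map f := by
    intro k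
    rw [ha, PySem.List.mem_sorted, hkeys, PySem.Set.mem_ofList]
  simp only [hgetD]
  rw [← List.foldl_flatMap]
  set F := a.flatMap (fun k => R.filter (fun i => f i == k)) with hF
  have hFperm : F.Perm R := pvFlat_perm f R a ha_nd ha_mem
  have hRlen : R.length = n.toNat := by
    rw [hR, PySem.List.length_pyRange_one]; simp
  have hFlen : F.length = n.toNat := by rw [hFperm.length_eq, hRlen]
  rw [PySem.List.pyRepeat_singleton]
  have hfill := pvFill F (List.replicate n.toNat 0) 0 (by simp [hFlen])
  rw [show ((0 : Nat) : Int) = (0 : Int) by simp] at hfill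
  rw [hfill]
  simp only [List.take_zero, List.nil_append]
  -- it remains: the bucket-concatenation is exactly B's stable sort of the range
  have hF_pair : F.Pairwise (pvRel f) := by
    rw [hF, List.pairwise_flatMap]
    constructor
    · intro k _
      rw [List.pairwise_filter]
      apply (PySem.List.pairwise_lt_pyRange_one 0 n).imp
      intro x y hxy hpx hpy
      have ex : f x = k := by simpa using hpx
      have ey : f y = k := by simpa using hpy
      exact Or.inr ⟨by omega, le_of_lt hxy⟩
    · apply ha_lt.imp
      intro k₁ k₂ hlt x hx y hy
      rcases List.mem_filter.1 hx with ⟨_, hpx⟩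
      rcases List.mem_filter.1 hy with ⟨_, hpy⟩
      have ex : f x = k₁ := by simpa using hpx
      have ey : f y = k₂ := by simpa using hpy
      exact Or.inl (by omega)
  have hS_pair := pvSorted_range_pairwise f n
  have hEq : F = PySem.List.sorted R f false :=
    List.Perm.eq_of_pairwise (fun a b _ _ => pvRel_antisymm f a b) hF_pair hS_pair
      (hFperm.trans (PySem.List.sorted_perm R f false).symm)
  rw [hEq]
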